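-- pv_equiv track=rewrite | github.com/Hussain-Alvi/sql_coder | extracting_information/metadata_extraction.py | generate_natural_report
-- ===== SOURCE A (Python) =====
-- def generate_natural_report(metadata: dict) -> str:
--     row_counts = {r['TableName']: int(r['RowCount']) for r in metadata.get('row_counts', [])}
--
--     pk_lookup = {}
--     for pk in metadata.get('primary_keys', []):
--         pk_lookup.setdefault(pk['TableName'], []).append(pk['ColumnName'])
--
--     fk_list = metadata.get('foreign_keys', [])
--     fk_by_table = {}
--     for fk in fk_list:
--         fk_by_table.setdefault(fk['ParentTable'], []).append(fk)
--
--     columns = metadata.get('columns', [])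
--     cols_by_table = {}
--     for c in columns:
--         cols_by_table.setdefault(c['TABLE_NAME'], []).append(c)
--
--     out_lines = ["Concise Database Schema Report\n"]
--
--     for t in metadata.get('tables', []):
--         schema = t.get('TABLE_SCHEMA')
--         tname = t.get('TABLE_NAME')
--         desc = t.get('TABLE_DESCRIPTION') or '(no description)'
--         rows_count = row_counts.get(tname, 'unknown')
--         cols = cols_by_table.get(tname, [])
--         col_names = [c['COLUMN_NAME'] for c in cols]
--
--         out_lines.append(f"Table: {schema}.{tname} ({rows_count} rows)")
--         out_lines.append(f"Description: {desc}")
--         out_lines.append(f"Columns ({len(cols)}): {', '.join(col_names)}")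
--
--         pk = pk_lookup.get(tname)
--         if pk:
--             out_lines.append(f"Primary key: {', '.join(pk)}")
--         fks = fk_by_table.get(tname, [])
--         if fks:
--             fk_summaries = [f"{fk['ParentColumn']} -> {fk['ReferencedTable']}.{fk['ReferencedColumn']}" for fk in fks]
--             out_lines.append(f"Foreign keys: {', '.join(fk_summaries)}")
--
--         out_lines.append("")
--
--     return "\n".join(out_lines)
-- ===== SOURCE B (Python) =====
-- def generate_natural_report(metadata: dict) -> str:
--     row_counts = metadata.get('row_counts', [])
--     primary_keys = metadata.get('primary_keys', [])
--     foreign_keys = metadata.get('foreign_keys', [])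
--     columns = metadata.get('columns', [])
--
--     def table_block(t):
--         schema = t.get('TABLE_SCHEMA')
--         tname = t.get('TABLE_NAME')
--         desc = t.get('TABLE_DESCRIPTION') or '(no description)'
--         rc = next((r for r in reversed(row_counts) if r['TableName'] == tname), None)
--         rows_count = 'unknown' if rc is None else int(rc['RowCount'])
--         col_names = [c['COLUMN_NAME'] for c in columns if c['TABLE_NAME'] == tname]
--         pk = [p['ColumnName'] for p in primary_keys if p['TableName'] == tname]
--         fk_summaries = [f"{fk['ParentColumn']} -> {fk['ReferencedTable']}.{fk['ReferencedColumn']}"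
--                         for fk in foreign_keys if fk['ParentTable'] == tname]
--         return ([f"Table: {schema}.{tname} ({rows_count} rows)",
--                  f"Description: {desc}",
--                  f"Columns ({len(col_names)}): {', '.join(col_names)}"]
--                 + ([f"Primary key: {', '.join(pk)}"] if pk else [])
--                 + ([f"Foreign keys: {', '.join(fk_summaries)}"] if fk_summaries else [])
--                 + [""])
--
--     blocks = [line for t in metadata.get('tables', []) for line in table_block(t)]
--     return "\n".join(["Concise Database Schema Report\n"] + blocks)
-- ===== Notes on version B (the rewrite author's own statement) =====
-- stated objective: alternative
-- what changed: B drops A's four precomputed grouping/lookup dicts and instead, per table, filters the raw row_counts/primary_keys/foreign_keys/columns lists (taking the last matching row-count entry to mirror dict last-wins), assembling each table's block directly.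
import Mathlib
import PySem

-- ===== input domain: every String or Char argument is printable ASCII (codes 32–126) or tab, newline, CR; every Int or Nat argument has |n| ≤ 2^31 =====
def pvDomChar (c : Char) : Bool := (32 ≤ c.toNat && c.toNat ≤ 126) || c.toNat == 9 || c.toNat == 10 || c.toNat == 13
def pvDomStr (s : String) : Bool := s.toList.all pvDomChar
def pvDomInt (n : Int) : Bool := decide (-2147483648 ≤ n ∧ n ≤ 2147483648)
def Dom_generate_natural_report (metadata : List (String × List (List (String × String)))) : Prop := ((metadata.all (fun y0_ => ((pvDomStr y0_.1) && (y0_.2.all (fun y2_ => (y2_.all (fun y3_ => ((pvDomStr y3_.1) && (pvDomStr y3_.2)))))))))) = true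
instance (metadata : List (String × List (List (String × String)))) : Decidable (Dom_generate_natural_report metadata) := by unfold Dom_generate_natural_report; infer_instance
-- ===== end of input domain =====

-- B drops A's four precomputed grouping dicts and instead filters the metadata lists per table
-- inside the loop (objective: alternative decomposition, same observable result).

-- ===== PORT A =====
-- shared low-level helpers: r['K'] (KeyError excluded by Pre_, so the "" default is never seen
-- inside Pre_), and Python's str() of a value that may be None
def pvGet (r : List (String × String)) (k : String) : Option String :=
  PySem.Dict.get? (PySem.Dict.mk r) k
def pvGetS (r : List (String × String)) (k : String) : String := (pvGet r k).getD ""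
def pvOptStr : Option String → String
  | some s => s
  | none => "None"
-- desc = t.get('TABLE_DESCRIPTION') or '(no description)'  (None and "" are falsy)
def pvDesc (t : PySem.Dict String String) : String :=
  match t.get? "TABLE_DESCRIPTION" with
  | some s => if s = "" then "(no description)" else s
  | none => "(no description)"
-- fk summary f-string, shared by both ports
def pvFkSummary (fk : List (String × String)) : String :=
  pvGetS fk "ParentColumn" ++ " -> " ++ pvGetS fk "ReferencedTable" ++ "." ++ pvGetS fk "ReferencedColumn"

-- body of A's 'for t in metadata.get('tables', [])' loop (a named helper for the fold)
def pvBodyA (row_counts : PySem.Dict String Int) (pk_lookup : PySem.Dict String (List String))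
    (fk_by_table cols_by_table : PySem.Dict String (List (List (String × String))))
    (out_lines : List String) (t : List (String × String)) : List String :=
  let td := PySem.Dict.mk t
  let schema := td.get? "TABLE_SCHEMA"
  let tname := td.get? "TABLE_NAME"
  let desc := pvDesc td
  -- dict.get with a possibly-None key: a None key matches no string key (exact hand-port)
  let rows_count : Option Int := match tname with | some s => row_counts.get? s | none => none
  let cols : List (List (String × String)) := match tname with | some s => cols_by_table.getD s [] | none => []
  let col_names := cols.map (fun c => pvGetS c "COLUMN_NAME")
  let out_lines := out_lines ++ ["Table: " ++ pvOptStr schema ++ "." ++ pvOptStr tname ++ " (" ++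
      (match rows_count with | some n => PySem.Int.toStr n | none => "unknown") ++ " rows)"]
  let out_lines := out_lines ++ ["Description: " ++ desc]
  let out_lines := out_lines ++ ["Columns (" ++ PySem.Int.toStr (cols.length : Int) ++ "): " ++ PySem.Str.join ", " col_names]
  let pk : Option (List String) := match tname with | some s => pk_lookup.get? s | none => none
  let out_lines := match pk with
    | some l => if l ≠ [] then out_lines ++ ["Primary key: " ++ PySem.Str.join ", " l] else out_lines
    | none => out_lines
  let fks : List (List (String × String)) := match tname with | some s => fk_by_table.getD s [] | none => []
  let out_lines := if fks ≠ [] then out_lines ++ ["Foreign keys: " ++ PySem.Str.join ", " (fks.map pvFkSummary)] else out_lines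
  out_lines ++ [""]

def generate_natural_report (metadata : List (String × List (List (String × String)))) : String :=
  let md := PySem.Dict.mk metadata
  let row_counts : PySem.Dict String Int :=
    (md.getD "row_counts" []).foldl
      (fun d r => d.insert (pvGetS r "TableName") ((PySem.Int.ofStr? (pvGetS r "RowCount")).getD 0))
      PySem.Dict.empty
  let pk_lookup : PySem.Dict String (List String) :=
    (md.getD "primary_keys" []).foldl
      (fun d p => d.modify (pvGetS p "TableName") [] (· ++ [pvGetS p "ColumnName"]))
      PySem.Dict.empty
  let fk_by_table : PySem.Dict String (List (List (String × String))) :=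
    (md.getD "foreign_keys" []).foldl
      (fun d fk => d.modify (pvGetS fk "ParentTable") [] (· ++ [fk]))
      PySem.Dict.empty
  let cols_by_table : PySem.Dict String (List (List (String × String))) :=
    (md.getD "columns" []).foldl
      (fun d c => d.modify (pvGetS c "TABLE_NAME") [] (· ++ [c]))
      PySem.Dict.empty
  let out_lines := (md.getD "tables" []).foldl
      (pvBodyA row_counts pk_lookup fk_by_table cols_by_table)
      ["Concise Database Schema Report\n"]
  PySem.Str.join "\n" out_lines

-- ===== PORT B =====
-- B computes each table's block directly by filtering the raw metadata lists
def pvTableBlock (row_counts primary_keys foreign_keys columns : List (List (String × String)))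
    (t : List (String × String)) : List String :=
  let td := PySem.Dict.mk t
  let schema := td.get? "TABLE_SCHEMA"
  let tname := td.get? "TABLE_NAME"
  let desc := pvDesc td
  let rc := row_counts.reverse.find? (fun r => some (pvGetS r "TableName") == tname)
  let rows_count := match rc with
    | some r => PySem.Int.toStr ((PySem.Int.ofStr? (pvGetS r "RowCount")).getD 0)
    | none => "unknown"
  let col_names := (columns.filter (fun c => some (pvGetS c "TABLE_NAME") == tname)).map (fun c => pvGetS c "COLUMN_NAME")
  let pk := (primary_keys.filter (fun p => some (pvGetS p "TableName") == tname)).map (fun p => pvGetS p "ColumnName")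
  let fk_summaries := (foreign_keys.filter (fun fk => some (pvGetS fk "ParentTable") == tname)).map pvFkSummary
  ["Table: " ++ pvOptStr schema ++ "." ++ pvOptStr tname ++ " (" ++ rows_count ++ " rows)",
   "Description: " ++ desc,
   "Columns (" ++ PySem.Int.toStr (col_names.length : Int) ++ "): " ++ PySem.Str.join ", " col_names]
  ++ (if pk ≠ [] then ["Primary key: " ++ PySem.Str.join ", " pk] else [])
  ++ (if fk_summaries ≠ [] then ["Foreign keys: " ++ PySem.Str.join ", " fk_summaries] else [])
  ++ [""]

def generate_natural_report_alt (metadata : List (String × List (List (String × String)))) : String :=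
  let md := PySem.Dict.mk metadata
  let blocks := (md.getD "tables" []).flatMap
      (pvTableBlock (md.getD "row_counts" []) (md.getD "primary_keys" []) (md.getD "foreign_keys" []) (md.getD "columns" []))
  PySem.Str.join "\n" ("Concise Database Schema Report\n" :: blocks)

-- ===== PRECONDITION & SPEC =====
-- Pre_ = exactly the inputs where Python A returns: every row_counts entry has 'TableName' and an
-- int-parseable 'RowCount'; every primary_keys entry has 'TableName' and 'ColumnName'; every
-- foreign_keys entry has 'ParentTable' (the other three keys only if its parent is a listed table);
-- every columns entry has 'TABLE_NAME' ('COLUMN_NAME' only if its table is listed) — otherwise A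
-- raises KeyError/ValueError.
def Pre_generate_natural_report (metadata : List (String × List (List (String × String)))) : Prop :=
  let md := PySem.Dict.mk metadata
  let names := (md.getD "tables" []).map (fun t => pvGet t "TABLE_NAME")
  (∀ r ∈ md.getD "row_counts" [], (pvGet r "TableName").isSome ∧
      ∃ v, pvGet r "RowCount" = some v ∧ (PySem.Int.ofStr? v).isSome) ∧
  (∀ p ∈ md.getD "primary_keys" [], (pvGet p "TableName").isSome ∧ (pvGet p "ColumnName").isSome) ∧
  (∀ fk ∈ md.getD "foreign_keys" [], (pvGet fk "ParentTable").isSome ∧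
      (pvGet fk "ParentTable" ∈ names →
        (pvGet fk "ParentColumn").isSome ∧ (pvGet fk "ReferencedTable").isSome ∧ (pvGet fk "ReferencedColumn").isSome)) ∧
  (∀ c ∈ md.getD "columns" [], (pvGet c "TABLE_NAME").isSome ∧
      (pvGet c "TABLE_NAME" ∈ names → (pvGet c "COLUMN_NAME").isSome))
instance (metadata : List (String × List (List (String × String)))) : Decidable (Pre_generate_natural_report metadata) := by
  unfold Pre_generate_natural_report; infer_instance

def pvWitness_generate_natural_report : (List (String × List (List (String × String)))) :=
  [("tables", [[("TABLE_SCHEMA", "dbo"), ("TABLE_NAME", "users")]]),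
   ("row_counts", [[("TableName", "users"), ("RowCount", "12")]]),
   ("columns", [[("TABLE_NAME", "users"), ("COLUMN_NAME", "id")]])]

def Spec_generate_natural_report (metadata : List (String × List (List (String × String)))) (out : String) : Prop := out = generate_natural_report_alt metadata
instance (metadata : List (String × List (List (String × String)))) (out : String) : Decidable (Spec_generate_natural_report metadata out) := by unfold Spec_generate_natural_report; infer_instance

-- ===== CLAIM (what is proved, stated in full; the proofs are below) =====
def Claim_equal_generate_natural_report : Prop := ∀ (metadata : List (String × List (List (String × String)))), Dom_generate_natural_report metadata → Pre_generate_natural_report metadata → Spec_generate_natural_report metadata (generate_natural_report metadata)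

-- ===== LEMMAS AND PROOFS =====

-- A's dict comprehension vs B's reversed scan: lookup in a last-wins insert-fold is find? on the reverse
theorem pv_get?_foldl_insert {α : Type} (l : List α) (k : α → String) (v : α → Int)
    (d : PySem.Dict String Int) (s : String) :
    (l.foldl (fun d x => d.insert (k x) (v x)) d).get? s
      = match l.reverse.find? (fun x => k x == s) with
        | some x => some (v x)
        | none => d.get? s := by
  induction l generalizing d with
  | nil => simp
  | cons x xs ih =>
    simp only [List.foldl_cons, List.reverse_cons, List.find?_append, ih]
    cases h : xs.reverse.find? (fun x => k x == s) with
    | some y => simp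
    | none =>
      simp only [Option.none_or]
      rw [PySem.Dict.get?_insert]
      by_cases hk : (k x == s) = true
      · have hs : s = k x := (beq_iff_eq.mp hk).symm
        simp [List.find?, hs]
      · have hs : ¬ s = k x := fun e => hk (beq_iff_eq.mpr e.symm)
        simp [List.find?, hk, hs]

-- A's setdefault/append grouping dict, looked up with getD, is B's filter+map
-- keyed variant of PySem.Dict.getD_foldl_modify_append (the library lemma fixes the pair shape)
theorem pv_getD_group_gen {α β : Type} (l : List α) (k : α → String) (v : α → β)
    (d : PySem.Dict String (List β)) (s : String) :
    ((l.foldl (fun d x => d.modify (k x) [] (· ++ [v x])) d).getD s [])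
      = d.getD s [] ++ (l.filter (fun x => k x == s)).map v := by
  induction l generalizing d with
  | nil => simp
  | cons x xs ih =>
    simp only [List.foldl_cons, ih, PySem.Dict.getD_modify, List.filter_cons]
    by_cases hk : (k x == s) = true
    · have hs : s = k x := (beq_iff_eq.mp hk).symm
      simp [hk, hs]
    · have hs : ¬ s = k x := fun e => hk (beq_iff_eq.mpr e.symm)
      simp [hk, hs]

theorem pv_getD_group {α β : Type} (l : List α) (k : α → String) (v : α → β) (s : String) :
    ((l.foldl (fun d x => d.modify (k x) [] (· ++ [v x])) PySem.Dict.empty).getD s [])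
      = (l.filter (fun x => k x == s)).map v := by
  simp [pv_getD_group_gen]

-- the same grouping loop when the stored value is the element itself
theorem pv_getD_group_self {α : Type} (l : List α) (k : α → String) (s : String) :
    ((l.foldl (fun d x => d.modify (k x) [] (· ++ [x])) PySem.Dict.empty).getD s [])
      = l.filter (fun x => k x == s) := by
  simpa using pv_getD_group l k id s

-- A's 'pk = d.get(t); if pk: …' equals B's 'if filtered ≠ []: …' once getD s [] is the filtered list
theorem pv_match_get?_ne_nil {d : PySem.Dict String (List String)} {s : String}
    (X : List String → List String) (Y : List String) :
    (match d.get? s with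
     | some l => if l ≠ [] then X l else Y
     | none => Y)
      = if d.getD s [] ≠ [] then X (d.getD s []) else Y := by
  cases h : d.get? s <;> simp [PySem.Dict.getD_eq_get?_getD, h]

theorem pv_body_eq (rcs pks fks cols : List (List (String × String)))
    (acc : List String) (t : List (String × String)) :
    pvBodyA
      (rcs.foldl (fun d r => d.insert (pvGetS r "TableName") ((PySem.Int.ofStr? (pvGetS r "RowCount")).getD 0)) PySem.Dict.empty)
      (pks.foldl (fun d p => d.modify (pvGetS p "TableName") [] (· ++ [pvGetS p "ColumnName"])) PySem.Dict.empty)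
      (fks.foldl (fun d fk => d.modify (pvGetS fk "ParentTable") [] (· ++ [fk])) PySem.Dict.empty)
      (cols.foldl (fun d c => d.modify (pvGetS c "TABLE_NAME") [] (· ++ [c])) PySem.Dict.empty)
      acc t
      = acc ++ pvTableBlock rcs pks fks cols t := by
  unfold pvBodyA pvTableBlock
  cases htn : (PySem.Dict.mk t).get? "TABLE_NAME" with
  | none =>
    simp only [htn]
    simp only [Option.beq_none]
    simp only [List.append_assoc]
    rw [List.find?_eq_none.mpr (fun x _ => by simp)]
    simp [List.append_assoc]
  | some s =>
    simp only [htn, Option.some_beq_some]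
    rw [pv_get?_foldl_insert rcs (fun r => pvGetS r "TableName")
          (fun r => (PySem.Int.ofStr? (pvGetS r "RowCount")).getD 0) PySem.Dict.empty s]
    rw [pv_getD_group_self fks (fun fk => pvGetS fk "ParentTable") s,
        pv_getD_group_self cols (fun c => pvGetS c "TABLE_NAME") s,
        pv_match_get?_ne_nil]
    rw [pv_getD_group pks (fun p => pvGetS p "TableName") (fun p => pvGetS p "ColumnName") s]
    cases h : rcs.reverse.find? (fun r => pvGetS r "TableName" == s) <;>
      (simp only [h, PySem.Dict.get?_empty]
       split_ifs <;> simp [List.append_assoc]) <;>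
      simp_all

theorem pv_foldl_eq (rcs pks fks cols : List (List (String × String)))
    (tables : List (List (String × String))) (acc : List String) :
    tables.foldl
      (pvBodyA
        (rcs.foldl (fun d r => d.insert (pvGetS r "TableName") ((PySem.Int.ofStr? (pvGetS r "RowCount")).getD 0)) PySem.Dict.empty)
        (pks.foldl (fun d p => d.modify (pvGetS p "TableName") [] (· ++ [pvGetS p "ColumnName"])) PySem.Dict.empty)
        (fks.foldl (fun d fk => d.modify (pvGetS fk "ParentTable") [] (· ++ [fk])) PySem.Dict.empty)
        (cols.foldl (fun d c => d.modify (pvGetS c "TABLE_NAME") [] (· ++ [c])) PySem.Dict.empty))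
      acc
      = acc ++ tables.flatMap (pvTableBlock rcs pks fks cols) := by
  induction tables generalizing acc with
  | nil => simp
  | cons t ts ih =>
    simp only [List.foldl_cons, List.flatMap_cons, ih, pv_body_eq, List.append_assoc]

-- ===== VERDICT (by name: the statement is the Claim_ definition above) =====
theorem generate_natural_report_spec : Claim_equal_generate_natural_report := by
  intro metadata _ _
  unfold Spec_generate_natural_report generate_natural_report generate_natural_report_alt
  dsimp only
  rw [pv_foldl_eq]
  rfl
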